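-- pv_equiv track=rewrite | github.com/calebthewood/advent-of-code | 2022/day_7.py | build_file_system
-- ===== SOURCE A (Python) =====
-- def build_file_system(text):
--     """ Build a dict mapping out a directory from lines of shell commands"""
--     file_system = {"root": 0}
--     path = []
--     for line in text:
--         data = line.split(" ")
--         # if $, either view, move in, or move out
--         if data[0] == "$" and data[1] == "cd":
--             if data[2] == "/":
--                 path.clear()
--                 path.append("root")
--             elif data[2] == "..":
--                 if len(path) > 1:
--                     path.pop()
--             else:
--                 path.append(data[2])
--         # if dir, add new directory to {}
--         elif data[0] == "dir":
--             dir = data[1]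
--             new_path = f"{'/'.join(path)}/{dir}"
--             if new_path not in file_system:
--                 file_system[new_path] = 0
--         # if numeric, add value to all values in path
--         elif data[0].isdigit():
--             size = int(data[0])
--             path_copy = path.copy()
--             while len(path_copy) > 0:
--                 temp_path = "/".join(path_copy)
--                 file_system[temp_path] += size
--                 path_copy.pop()
--     return file_system
-- ===== SOURCE B (Python) =====
-- def build_file_system(text):
--     """Same mapping, built differently: pending sizes live on a stack and are
--     flushed into the dict when a directory is left, instead of updating every
--     re-joined ancestor path for every file line."""
--     totals = {"root": 0}
--     stack = []  # entries (full_path, pending_size); last = innermost dir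
--
--     def pop():
--         j, s = stack.pop()
--         if s:
--             totals[j] = totals.get(j, 0) + s
--         if stack:
--             stack[-1] = (stack[-1][0], stack[-1][1] + s)
--
--     for line in text:
--         data = line.split(" ")
--         if data[0] == "$" and data[1] == "cd":
--             if data[2] == "/":
--                 while stack:
--                     pop()
--                 stack.append(("root", 0))
--             elif data[2] == "..":
--                 if len(stack) > 1:
--                     pop()
--             else:
--                 name = data[2]
--                 stack.append((stack[-1][0] + "/" + name if stack else name, 0))
--         elif data[0] == "dir":
--             key = (stack[-1][0] if stack else "") + "/" + data[1]
--             totals.setdefault(key, 0)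
--         elif data[0].isdigit() and stack:
--             stack[-1] = (stack[-1][0], stack[-1][1] + int(data[0]))
--     while stack:
--         pop()
--     return totals
-- ===== Notes on version B (the rewrite author's own statement) =====
-- stated objective: alternative
-- what changed: A re-joins every ancestor path string and updates each ancestor's dict entry for every file line; B keeps a stack of (full-path, pending-size) pairs built with incremental joins, adds each file size once to the stack top, and flushes a directory's accumulated subtree size into the dict only when that directory is left (or at end of input).
import Mathlib
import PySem

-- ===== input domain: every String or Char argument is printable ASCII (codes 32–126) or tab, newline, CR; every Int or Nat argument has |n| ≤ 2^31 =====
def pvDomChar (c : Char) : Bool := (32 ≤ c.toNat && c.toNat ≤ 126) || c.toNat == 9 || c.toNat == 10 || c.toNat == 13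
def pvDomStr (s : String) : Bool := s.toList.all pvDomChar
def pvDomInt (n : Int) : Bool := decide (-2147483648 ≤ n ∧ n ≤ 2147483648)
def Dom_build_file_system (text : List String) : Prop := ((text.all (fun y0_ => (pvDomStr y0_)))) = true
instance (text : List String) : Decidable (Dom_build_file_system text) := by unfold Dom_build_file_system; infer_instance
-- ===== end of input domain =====

-- B replaces A's per-file walk that re-joins and updates every ancestor path by a stack of
-- pending directory sizes flushed once per directory exit; objective: alternative.

-- ===== PORT A =====
-- `while len(path_copy) > 0: file_system["/".join(path_copy)] += size; path_copy.pop()`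
-- `fs[k] += size` is Dict.modify; exact where k is a key of fs (guaranteed by Pre_; Python raises KeyError otherwise)
def pvAddAllA (size : Int) (fs : PySem.Dict String Int) (p : List String) : PySem.Dict String Int :=
  match p with
  | [] => fs
  | h :: t => pvAddAllA size ((fs).modify (PySem.Str.join "/" (h :: t)) 0 (· + size)) (h :: t).dropLast
termination_by p.length
decreasing_by simp [List.length_dropLast]

-- one line of A's loop; state = (file_system, path)
def pvStepA (st : PySem.Dict String Int × List String) (line : String) :
    PySem.Dict String Int × List String :=
  let data := (PySem.Str.split? line " ").getD []   -- line.split(" "); sep ≠ "" so never none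
  let d0 := PySem.List.pyGetD data 0 ""             -- data[0] always exists (split is never empty)
  let d1 := PySem.List.pyGetD data 1 ""             -- data[1]; Python raises when missing (outside Pre_)
  if d0 = "$" ∧ d1 = "cd" then
    let d2 := PySem.List.pyGetD data 2 ""           -- data[2]; Python raises when missing (outside Pre_)
    if d2 = "/" then (st.1, ["root"])
    else if d2 = ".." then (if st.2.length > 1 then (st.1, st.2.dropLast) else st)
    else (st.1, st.2 ++ [d2])
  else if d0 = "dir" then
    let np := PySem.Str.join "/" st.2 ++ "/" ++ d1
    if !st.1.contains np then (st.1.insert np 0, st.2) else st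
  else if PySem.Str.strIsdigit d0 then
    (pvAddAllA ((PySem.Int.ofStr? d0).getD 0) st.1 st.2, st.2)  -- int(data[0]); isdigit ⇒ parse succeeds
  else st

def build_file_system (text : List String) : List (String × Int) :=
  (text.foldl pvStepA (PySem.Dict.mk [("root", 0)], [])).1.items

-- ===== PORT B =====
-- totals[j] = totals.get(j, 0) + s
def pvIns (t : PySem.Dict String Int) (j : String) (s : Int) : PySem.Dict String Int :=
  t.insert j (t.getD j 0 + s)

-- stack[-1] = (stack[-1][0], stack[-1][1] + s)   (python's stack top = list HEAD here)
def pvPassUp (s : Int) : List (String × Int) → List (String × Int)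
  | [] => []
  | (j1, s1) :: r => (j1, s1 + s) :: r

-- Source B's pop(): flush the innermost pending size into totals and pass it to the parent
def pvPopB (st : PySem.Dict String Int × List (String × Int)) :
    PySem.Dict String Int × List (String × Int) :=
  match st with
  | (t, []) => (t, [])                              -- unreachable: pop is only called on a nonempty stack
  | (t, (j, s) :: rest) => ((if s ≠ 0 then pvIns t j s else t), pvPassUp s rest)

-- `while stack: pop()`
def pvDrainB (t : PySem.Dict String Int) (stk : List (String × Int)) : PySem.Dict String Int :=
  match stk with
  | [] => t
  | (j, s) :: rest => pvDrainB (if s ≠ 0 then pvIns t j s else t) (pvPassUp s rest)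
termination_by stk.length
decreasing_by
  cases rest with
  | nil => simp [pvPassUp]
  | cons e r => cases e; simp [pvPassUp]

-- one line of Source B's loop; state = (totals, stack)
def pvStepB (st : PySem.Dict String Int × List (String × Int)) (line : String) :
    PySem.Dict String Int × List (String × Int) :=
  let data := (PySem.Str.split? line " ").getD []
  let d0 := PySem.List.pyGetD data 0 ""
  let d1 := PySem.List.pyGetD data 1 ""
  if d0 = "$" ∧ d1 = "cd" then
    let d2 := PySem.List.pyGetD data 2 ""
    if d2 = "/" then (pvDrainB st.1 st.2, [("root", 0)])
    else if d2 = ".." then (if st.2.length > 1 then pvPopB st else st)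
    else
      -- stack.append((stack[-1][0] + "/" + name if stack else name, 0))
      (st.1, ((if st.2 = [] then d2 else (st.2.headD ("", 0)).1 ++ "/" ++ d2), 0) :: st.2)
  else if d0 = "dir" then
    -- key = (stack[-1][0] if stack else "") + "/" + data[1]
    (st.1.setdefault ((st.2.headD ("", 0)).1 ++ "/" ++ d1) 0, st.2)
  else if PySem.Str.strIsdigit d0 ∧ st.2 ≠ [] then
    (st.1, pvPassUp ((PySem.Int.ofStr? d0).getD 0) st.2)
  else st

def build_file_system_alt (text : List String) : List (String × Int) :=
  let fin := text.foldl pvStepB (PySem.Dict.mk [("root", 0)], [])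
  (pvDrainB fin.1 fin.2).items

-- ===== PRECONDITION & SPEC =====
-- the "/"-joins of the nonempty prefixes of the path, innermost first (the keys A's size loop touches)
def pvJoinsRev (q : List String) : List String :=
  match q with
  | [] => []
  | x :: rest => PySem.Str.join "/" ((x :: rest).reverse) :: pvJoinsRev rest

def pvJoins (p : List String) : List String := pvJoinsRev p.reverse

-- Pre_ excludes exactly the inputs where A raises: IndexError on a "$"/"dir" line with too few
-- space-separated tokens, and KeyError on a size line whose ancestor joined path is not yet a dict
-- key.  The KeyError condition is inherently stateful (it depends on the cd/dir lines seen so far),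
-- so this predicate replays only the path and the key set — it computes no sizes and no output.
def pvPreGo (lines : List String) (path : List String) (keys : List String) : Bool :=
  match lines with
  | [] => true
  | line :: rest =>
    let data := (PySem.Str.split? line " ").getD []
    let d0 := PySem.List.pyGetD data 0 ""
    if d0 = "$" then
      if data.length < 2 then false
      else if PySem.List.pyGetD data 1 "" = "cd" then
        if data.length < 3 then false
        else
          let d2 := PySem.List.pyGetD data 2 ""
          if d2 = "/" then pvPreGo rest ["root"] keys
          else if d2 = ".." then pvPreGo rest (if path.length > 1 then path.dropLast else path) keys
          else pvPreGo rest (path ++ [d2]) keys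
      else pvPreGo rest path keys
    else if d0 = "dir" then
      if data.length < 2 then false
      else
        let np := PySem.Str.join "/" path ++ "/" ++ PySem.List.pyGetD data 1 ""
        pvPreGo rest path (if np ∈ keys then keys else keys ++ [np])
    else if PySem.Str.strIsdigit d0 then
      (pvJoins path).all (fun j => decide (j ∈ keys)) && pvPreGo rest path keys
    else pvPreGo rest path keys

def Pre_build_file_system (text : List String) : Prop := pvPreGo text [] ["root"] = true
instance (text : List String) : Decidable (Pre_build_file_system text) := by
  unfold Pre_build_file_system; infer_instance

def pvWitness_build_file_system : List String :=
  ["$ cd /", "dir a", "1234 b.txt", "$ cd a", "77 c.txt", "$ cd ..", "$ ls"]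

def Spec_build_file_system (text : List String) (out : List (String × Int)) : Prop :=
  out = build_file_system_alt text
instance (text : List String) (out : List (String × Int)) : Decidable (Spec_build_file_system text out) := by
  unfold Spec_build_file_system; infer_instance

-- ===== CLAIM (what is proved, stated in full; the proofs are below) =====
def Claim_equal_build_file_system : Prop := ∀ (text : List String), Dom_build_file_system text → Pre_build_file_system text → Spec_build_file_system text (build_file_system text)

-- ===== LEMMAS AND PROOFS =====

-- drain with an explicit carry (the size already passed up from below the current top)
def pvDrainC (t : PySem.Dict String Int) (a : Int) (stk : List (String × Int)) : PySem.Dict String Int :=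
  match stk with
  | [] => t
  | (j, s) :: rest => pvDrainC (if a + s ≠ 0 then pvIns t j (a + s) else t) (a + s) rest

-- drain legality: every entry whose flushed value is nonzero has its key in `K`
def pvC (K : List String) (a : Int) (stk : List (String × Int)) : Prop :=
  match stk with
  | [] => True
  | (j, s) :: rest => (a + s ≠ 0 → j ∈ K) ∧ pvC K (a + s) rest

-- total amount drain adds to key k
def pvFa (a : Int) (stk : List (String × Int)) (k : String) : Int :=
  match stk with
  | [] => 0
  | (j, s) :: rest => (if j = k then a + s else 0) + pvFa (a + s) rest k

-- A's size loop along an explicit key list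
def pvModList (s : Int) (fs : PySem.Dict String Int) (ks : List String) : PySem.Dict String Int :=
  match ks with
  | [] => fs
  | k :: rest => pvModList s (fs.modify k 0 (· + s)) rest

theorem pvPassUp_zero (r : List (String × Int)) : pvPassUp 0 r = r := by
  cases r with
  | nil => rfl
  | cons e r => cases e; simp [pvPassUp]

theorem map_fst_pvPassUp (s : Int) (r : List (String × Int)) :
    (pvPassUp s r).map Prod.fst = r.map Prod.fst := by
  cases r with
  | nil => rfl
  | cons e r => cases e; simp [pvPassUp]

theorem pvDrainB_passUp (t : PySem.Dict String Int) (a : Int) (r : List (String × Int)) :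
    pvDrainB t (pvPassUp a r) = pvDrainC t a r := by
  induction r generalizing t a with
  | nil => simp only [pvPassUp, pvDrainB]; rfl
  | cons e r ih =>
    obtain ⟨j, s⟩ := e
    show pvDrainB t ((j, s + a) :: r) = _
    rw [show s + a = a + s by ring]
    simp only [pvDrainB]
    rw [ih]
    rfl

theorem pvDrainB_eq (t : PySem.Dict String Int) (stk : List (String × Int)) :
    pvDrainB t stk = pvDrainC t 0 stk := by
  rw [← pvDrainB_passUp, pvPassUp_zero]

theorem pvDrainC_passUp (t : PySem.Dict String Int) (a b : Int) (r : List (String × Int)) :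
    pvDrainC t a (pvPassUp b r) = pvDrainC t (a + b) r := by
  cases r with
  | nil => rfl
  | cons e r =>
    obtain ⟨j, s⟩ := e
    simp only [pvPassUp, pvDrainC]
    rw [show a + (s + b) = a + b + s by ring]

theorem pvC_passUp {K : List String} {a b : Int} {r : List (String × Int)} :
    pvC K a (pvPassUp b r) ↔ pvC K (a + b) r := by
  cases r with
  | nil => simp [pvPassUp, pvC]
  | cons e r =>
    obtain ⟨j, s⟩ := e
    simp only [pvPassUp, pvC]
    rw [show a + (s + b) = a + b + s by ring]

theorem pvC_of_all_mem {K : List String} {r : List (String × Int)}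
    (h : ∀ j ∈ r.map Prod.fst, j ∈ K) (a : Int) : pvC K a r := by
  induction r generalizing a with
  | nil => trivial
  | cons e r ih =>
    obtain ⟨j, s⟩ := e
    refine ⟨fun _ => h j (by simp), ih (fun x hx => h x (by simp at hx ⊢; exact Or.inr hx)) _⟩

theorem pvC_mono {K K' : List String} (hK : ∀ x ∈ K, x ∈ K') :
    ∀ {a : Int} {r : List (String × Int)}, pvC K a r → pvC K' a r := by
  intro a r
  induction r generalizing a with
  | nil => intro _; trivial
  | cons e r ih =>
    obtain ⟨j, s⟩ := e
    rintro ⟨h1, h2⟩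
    exact ⟨fun hz => hK _ (h1 hz), ih h2⟩

theorem pvKeys_drainC {stk : List (String × Int)} :
    ∀ {t : PySem.Dict String Int} {a : Int}, pvC t.keys a stk →
      (pvDrainC t a stk).keys = t.keys := by
  induction stk with
  | nil => intro t a _; rfl
  | cons e r ih =>
    obtain ⟨j, s⟩ := e
    rintro t a ⟨h1, h2⟩
    by_cases hz : a + s ≠ 0
    · have hkeys : (pvIns t j (a + s)).keys = t.keys :=
        PySem.Dict.keys_insert_of_contains t _ ((PySem.Dict.contains_iff_mem_keys t j).2 (h1 hz))
      simp only [pvDrainC, if_pos hz]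
      rw [ih (by rw [hkeys]; exact h2), hkeys]
    · simp only [pvDrainC, if_neg hz]
      exact ih h2

theorem pvGetD_drainC {stk : List (String × Int)} :
    ∀ {t : PySem.Dict String Int} {a : Int}, pvC t.keys a stk →
      ∀ k, (pvDrainC t a stk).getD k 0 = t.getD k 0 + pvFa a stk k := by
  induction stk with
  | nil => intro t a _ k; simp [pvDrainC, pvFa]
  | cons e r ih =>
    obtain ⟨j, s⟩ := e
    rintro t a ⟨h1, h2⟩ k
    by_cases hz : a + s ≠ 0
    · have hkeys : (pvIns t j (a + s)).keys = t.keys :=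
        PySem.Dict.keys_insert_of_contains t _ ((PySem.Dict.contains_iff_mem_keys t j).2 (h1 hz))
      simp only [pvDrainC, if_pos hz]
      rw [ih (by rw [hkeys]; exact h2) k]
      simp only [pvFa, pvIns]
      rw [PySem.Dict.getD_insert]
      by_cases hk : k = j
      · subst hk; simp; ring
      · rw [if_neg hk, if_neg (fun h => hk h.symm)]; ring
    · simp only [pvDrainC, if_neg hz]
      rw [ih h2 k]
      simp only [pvFa]
      have hz' : a + s = 0 := by omega
      rw [hz']
      simp

theorem pvFa_passUp (a b : Int) (r : List (String × Int)) (k : String) :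
    pvFa a (pvPassUp b r) k = pvFa (a + b) r k := by
  cases r with
  | nil => rfl
  | cons e r =>
    obtain ⟨j, s⟩ := e
    simp only [pvPassUp, pvFa]
    rw [show a + (s + b) = a + b + s by ring]

theorem pvFa_shift (b : Int) (k : String) :
    ∀ (r : List (String × Int)) (a : Int),
      pvFa (a + b) r k = pvFa a r k + b * ((r.map Prod.fst).count k) := by
  intro r
  induction r with
  | nil => intro a; simp [pvFa]
  | cons e r ih =>
    obtain ⟨j, s⟩ := e
    intro a
    simp only [pvFa, List.map_cons, List.count_cons]
    rw [show a + b + s = (a + s) + b by ring, ih (a + s)]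
    by_cases hj : j = k
    · subst hj; simp; ring
    · simp [hj]

theorem pvKeys_modList {s : Int} :
    ∀ {ks : List String} {fs : PySem.Dict String Int}, (∀ k ∈ ks, k ∈ fs.keys) →
      (pvModList s fs ks).keys = fs.keys := by
  intro ks
  induction ks with
  | nil => intro fs _; rfl
  | cons k0 rest ih =>
    intro fs h
    have hk0 : k0 ∈ fs.keys := h k0 (by simp)
    have hkeys : (fs.modify k0 0 (· + s)).keys = fs.keys := by
      rw [PySem.Dict.keys_modify]
      exact PySem.Dict.keys_insert_of_contains fs _
        ((PySem.Dict.contains_iff_mem_keys fs k0).2 hk0)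
    simp only [pvModList]
    rw [ih (by intro k hk; rw [hkeys]; exact h k (by simp [hk])), hkeys]

theorem pvGetD_modList {s : Int} {k : String} :
    ∀ {ks : List String} {fs : PySem.Dict String Int},
      (pvModList s fs ks).getD k 0 = fs.getD k 0 + s * (ks.count k) := by
  intro ks
  induction ks with
  | nil => intro fs; simp [pvModList]
  | cons k0 rest ih =>
    intro fs
    simp only [pvModList]
    rw [ih, PySem.Dict.getD_modify]
    by_cases hk : k = k0
    · subst hk; simp; ring
    · simp [List.count_cons, hk]
      exact Or.inl (fun h => hk h.symm)

theorem pvDictExt {d1 d2 : PySem.Dict String Int} (hk : d1.keys = d2.keys)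
    (hnd : d1.keys.Nodup) (h : ∀ k, d1.getD k 0 = d2.getD k 0) : d1 = d2 := by
  apply PySem.Dict.ext
  rw [PySem.Dict.items_eq_map_keys d1 hnd 0, PySem.Dict.items_eq_map_keys d2 (hk ▸ hnd) 0, hk]
  exact List.map_congr_left (fun k _ => by rw [h k])

theorem pvInsert_fresh_comm {t : PySem.Dict String Int} {np j : String} (v : Int)
    (hj : j ∈ t.keys) (hnp : np ∉ t.keys) :
    (t.insert np 0).insert j v = (t.insert j v).insert np 0 := by
  have hcj : t.contains j = true := (PySem.Dict.contains_iff_mem_keys t j).2 hj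
  have hcnp : t.contains np = false := by
    cases hc : t.contains np with
    | false => rfl
    | true => exact absurd ((PySem.Dict.contains_iff_mem_keys t np).1 hc) hnp
  have hne : j ≠ np := fun h => hnp (h ▸ hj)
  have hb : (np == j) = false := beq_eq_false_iff_ne.2 (fun h => hne h.symm)
  have h1 : (t.insert np 0).contains j = true := by
    rw [PySem.Dict.contains_insert]
    simp [hcj]
  have h2 : (t.insert j v).contains np = false := by
    rw [PySem.Dict.contains_insert]
    simp [hcnp, hb]
  apply PySem.Dict.ext
  rw [PySem.Dict.items_insert_of_contains _ _ h1,
      PySem.Dict.items_insert_of_not_contains _ _ hcnp,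
      PySem.Dict.items_insert_of_not_contains _ _ h2,
      PySem.Dict.items_insert_of_contains _ _ hcj]
  simp only [List.map_append, List.map_cons, List.map_nil, hb]
  simp

theorem pvDrainC_insert_fresh {np : String} {stk : List (String × Int)} :
    ∀ {t : PySem.Dict String Int} {a : Int}, np ∉ t.keys → pvC t.keys a stk →
      pvDrainC (t.insert np 0) a stk = (pvDrainC t a stk).insert np 0 := by
  induction stk with
  | nil => intro t a _ _; rfl
  | cons e r ih =>
    obtain ⟨j, s⟩ := e
    rintro t a hnp ⟨h1, h2⟩
    by_cases hz : a + s ≠ 0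
    · have hj := h1 hz
      have hkeys : (pvIns t j (a + s)).keys = t.keys :=
        PySem.Dict.keys_insert_of_contains t _ ((PySem.Dict.contains_iff_mem_keys t j).2 hj)
      simp only [pvDrainC, if_pos hz]
      have hins : pvIns (t.insert np 0) j (a + s) = (pvIns t j (a + s)).insert np 0 := by
        unfold pvIns
        rw [PySem.Dict.getD_insert_of_ne t (k := np) (k' := j) 0 0 (fun h => hnp (h ▸ hj))]
        exact pvInsert_fresh_comm _ hj hnp
      rw [hins, ih (by rw [hkeys]; exact hnp) (by rw [hkeys]; exact h2)]
    · simp only [pvDrainC, if_neg hz]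
      exact ih hnp h2

theorem pvJoin_nil : PySem.Str.join "/" [] = "" := by decide

theorem pvJoin_singleton (x : String) : PySem.Str.join "/" [x] = x := by
  apply String.toList_inj.mp
  rw [PySem.Str.toList_join]
  simp [PySem.Chars.join_singleton]

theorem pvCharsJoin_append (sep q : List Char) :
    ∀ (ps : List (List Char)), ps ≠ [] →
      PySem.Chars.join sep (ps ++ [q]) = PySem.Chars.join sep ps ++ sep ++ q := by
  intro ps
  induction ps with
  | nil => intro h; exact absurd rfl h
  | cons a rest ih =>
    intro _
    cases rest with
    | nil => simp [PySem.Chars.join_cons_cons, PySem.Chars.join_singleton]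
    | cons b r2 =>
      simp only [List.cons_append, PySem.Chars.join_cons_cons]
      rw [← List.cons_append, ih (by simp)]
      simp [List.append_assoc]

theorem pvJoin_append {p : List String} (x : String) (hp : p ≠ []) :
    PySem.Str.join "/" (p ++ [x]) = PySem.Str.join "/" p ++ "/" ++ x := by
  apply String.toList_inj.mp
  simp only [String.toList_append, PySem.Str.toList_join, List.map_append, List.map_cons,
    List.map_nil]
  rw [pvCharsJoin_append _ _ _ (by simpa using hp)]

theorem pvJoins_concat (p : List String) (x : String) :
    pvJoins (p ++ [x]) = PySem.Str.join "/" (p ++ [x]) :: pvJoins p := by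
  simp [pvJoins, pvJoinsRev, List.reverse_append]

theorem pvJoins_cons (h : String) (t : List String) :
    pvJoins (h :: t) = PySem.Str.join "/" (h :: t) :: pvJoins (h :: t).dropLast := by
  have e : (h :: t).dropLast ++ [(h :: t).getLast (by simp)] = h :: t :=
    List.dropLast_concat_getLast (by simp)
  conv_lhs => rw [← e]
  rw [pvJoins_concat, e]

theorem pvJoins_length (p : List String) : (pvJoins p).length = p.length := by
  unfold pvJoins
  rw [← List.length_reverse (as := p)]
  induction p.reverse with
  | nil => rfl
  | cons x rest ih => simp only [pvJoinsRev, List.length_cons, ih]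

theorem pvAddAllA_eq (size : Int) (fs : PySem.Dict String Int) (p : List String) :
    pvAddAllA size fs p = pvModList size fs (pvJoins p) := by
  fun_induction pvAddAllA size fs p with
  | case1 fs => simp [pvJoins, pvJoinsRev, pvModList]
  | case2 fs h t ih =>
    rw [pvJoins_cons]
    simp only [pvModList]
    exact ih

theorem pvGo (lines : List String) :
    ∀ (fs : PySem.Dict String Int) (path : List String) (t : PySem.Dict String Int)
      (stk : List (String × Int)),
      pvPreGo lines path fs.keys = true →
      stk.map Prod.fst = pvJoins path →
      fs = pvDrainC t 0 stk →
      pvC t.keys 0 stk →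
      t.keys.Nodup →
      (lines.foldl pvStepA (fs, path)).1.items =
        (pvDrainB (lines.foldl pvStepB (t, stk)).1 (lines.foldl pvStepB (t, stk)).2).items := by
  induction lines with
  | nil =>
    intro fs path t stk _ h1 h2 h3 _
    simp only [List.foldl_nil]
    rw [pvDrainB_eq, ← h2]
  | cons line rest ih =>
    intro fs path t stk hpre h1 h2 h3 hnd
    have hlenstk : stk.length = path.length := by
      have hl := congrArg List.length h1
      simpa [pvJoins_length] using hl
    have hfk : fs.keys = t.keys := by rw [h2, pvKeys_drainC h3]
    simp only [List.foldl_cons]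
    simp only [pvStepA, pvStepB]
    simp only [pvPreGo] at hpre
    by_cases hdollar : PySem.List.pyGetD ((PySem.Str.split? line " ").getD []) 0 "" = "$"
    · rw [if_pos hdollar] at hpre
      by_cases hlen2 : ((PySem.Str.split? line " ").getD []).length < 2
      · rw [if_pos hlen2] at hpre; simp at hpre
      · rw [if_neg hlen2] at hpre
        by_cases hcd : PySem.List.pyGetD ((PySem.Str.split? line " ").getD []) 1 "" = "cd"
        · rw [if_pos hcd] at hpre
          by_cases hlen3 : ((PySem.Str.split? line " ").getD []).length < 3
          · rw [if_pos hlen3] at hpre; simp at hpre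
          · rw [if_neg hlen3] at hpre
            have hand : PySem.List.pyGetD ((PySem.Str.split? line " ").getD []) 0 "" = "$" ∧
                PySem.List.pyGetD ((PySem.Str.split? line " ").getD []) 1 "" = "cd" := ⟨hdollar, hcd⟩
            rw [if_pos hand, if_pos hand]
            by_cases hslash : PySem.List.pyGetD ((PySem.Str.split? line " ").getD []) 2 "" = "/"
            · -- "$ cd /": A resets the path, B drains the whole stack
              rw [if_pos hslash] at hpre
              rw [if_pos hslash, if_pos hslash]
              apply ih
              · exact hpre
              · simp [pvJoins, pvJoinsRev, pvJoin_singleton]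
              · simp only [pvDrainC]
                simp [pvDrainB_eq, ← h2]
              · simp [pvC]
              · rw [pvDrainB_eq, pvKeys_drainC h3]; exact hnd
            · rw [if_neg hslash] at hpre
              rw [if_neg hslash, if_neg hslash]
              by_cases hdot : PySem.List.pyGetD ((PySem.Str.split? line " ").getD []) 2 "" = ".."
              · -- "$ cd ..": A pops the path, B pops one stack entry
                rw [if_pos hdot] at hpre
                rw [if_pos hdot, if_pos hdot]
                by_cases hgt : path.length > 1
                · rw [if_pos hgt] at hpre
                  rw [if_pos hgt, if_pos (show stk.length > 1 by omega)]
                  obtain ⟨⟨j, s⟩, r, rfl⟩ : ∃ e r, stk = e :: r := by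
                    cases stk with
                    | nil => simp at hlenstk; omega
                    | cons e r => exact ⟨e, r, rfl⟩
                  obtain ⟨ph, pt, rfl⟩ : ∃ ph pt, path = ph :: pt := by
                    cases path with
                    | nil => simp at hgt
                    | cons ph pt => exact ⟨ph, pt, rfl⟩
                  rw [pvJoins_cons] at h1
                  simp only [List.map_cons, List.cons_eq_cons] at h1
                  obtain ⟨hj, h1r⟩ := h1
                  simp only [pvPopB]
                  apply ih
                  · exact hpre
                  · rw [map_fst_pvPassUp]; exact h1r
                  · rw [pvDrainC_passUp]
                    have h2' := h2
                    simp only [pvDrainC, zero_add] at h2' ⊢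
                    exact h2'
                  · rw [pvC_passUp]
                    obtain ⟨hc1, hc2⟩ := h3
                    have hkeq : (if s ≠ 0 then pvIns t j s else t).keys = t.keys := by
                      by_cases hs : s ≠ 0
                      · rw [if_pos hs]
                        exact PySem.Dict.keys_insert_of_contains t _
                          ((PySem.Dict.contains_iff_mem_keys t j).2 (hc1 (by simpa using hs)))
                      · rw [if_neg hs]
                    rw [hkeq]
                    simpa using hc2
                  · have hkeq : (if s ≠ 0 then pvIns t j s else t).keys = t.keys := by
                      by_cases hs : s ≠ 0
                      · rw [if_pos hs]
                        exact PySem.Dict.keys_insert_of_contains t _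
                          ((PySem.Dict.contains_iff_mem_keys t j).2 (h3.1 (by simpa using hs)))
                      · rw [if_neg hs]
                    rw [hkeq]; exact hnd
                · rw [if_neg hgt] at hpre
                  rw [if_neg hgt, if_neg (show ¬ stk.length > 1 by omega)]
                  exact ih fs path t stk hpre h1 h2 h3 hnd
              · -- "$ cd name": A appends to the path, B pushes a fresh stack entry
                rw [if_neg hdot] at hpre
                rw [if_neg hdot, if_neg hdot]
                have hjx : (if stk = [] then PySem.List.pyGetD ((PySem.Str.split? line " ").getD []) 2 ""
                      else (stk.headD ("", 0)).1 ++ "/" ++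
                        PySem.List.pyGetD ((PySem.Str.split? line " ").getD []) 2 "") =
                    PySem.Str.join "/" (path ++ [PySem.List.pyGetD ((PySem.Str.split? line " ").getD []) 2 ""]) := by
                  cases stk with
                  | nil =>
                    have hpnil : path = [] := by
                      cases path with
                      | nil => rfl
                      | cons a b => simp at hlenstk
                    rw [hpnil]
                    simp [pvJoin_singleton]
                  | cons e r =>
                    obtain ⟨j, s⟩ := e
                    obtain ⟨ph, pt, rfl⟩ : ∃ ph pt, path = ph :: pt := by
                      cases path with
                      | nil => simp at hlenstk
                      | cons ph pt => exact ⟨ph, pt, rfl⟩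
                    rw [pvJoins_cons] at h1
                    simp only [List.map_cons, List.cons_eq_cons] at h1
                    rw [pvJoin_append _ (by simp), ← h1.1]
                    simp
                rw [hjx]
                apply ih
                · exact hpre
                · rw [pvJoins_concat]
                  exact congrArg _ h1
                · simp only [pvDrainC, add_zero]
                  simpa using h2
                · exact ⟨by simp, by simpa using h3⟩
                · exact hnd
        · -- "$ <not cd>": everything is a no-op
          rw [if_neg hcd] at hpre
          have hno1 : ¬(PySem.List.pyGetD ((PySem.Str.split? line " ").getD []) 0 "" = "$" ∧
              PySem.List.pyGetD ((PySem.Str.split? line " ").getD []) 1 "" = "cd") := fun h => hcd h.2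
          rw [if_neg hno1, if_neg hno1]
          have hno2 : ¬(PySem.List.pyGetD ((PySem.Str.split? line " ").getD []) 0 "" = "dir") := by
            rw [hdollar]; decide
          rw [if_neg hno2, if_neg hno2]
          have hno3 : ¬(PySem.Str.strIsdigit
              (PySem.List.pyGetD ((PySem.Str.split? line " ").getD []) 0 "") = true) := by
            rw [hdollar]; decide
          rw [if_neg hno3, if_neg (fun h => hno3 h.1)]
          exact ih fs path t stk hpre h1 h2 h3 hnd
    · rw [if_neg hdollar] at hpre
      have hno1 : ¬(PySem.List.pyGetD ((PySem.Str.split? line " ").getD []) 0 "" = "$" ∧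
          PySem.List.pyGetD ((PySem.Str.split? line " ").getD []) 1 "" = "cd") := fun h => hdollar h.1
      rw [if_neg hno1, if_neg hno1]
      by_cases hdir : PySem.List.pyGetD ((PySem.Str.split? line " ").getD []) 0 "" = "dir"
      · -- "dir name": both sides record the key if it is new
        rw [if_pos hdir] at hpre
        rw [if_pos hdir, if_pos hdir]
        by_cases hlen2 : ((PySem.Str.split? line " ").getD []).length < 2
        · rw [if_pos hlen2] at hpre; simp at hpre
        · rw [if_neg hlen2] at hpre
          have hjh : (stk.headD ("", 0)).1 = PySem.Str.join "/" path := by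
            cases stk with
            | nil =>
              have hpnil : path = [] := by
                cases path with
                | nil => rfl
                | cons a b => simp at hlenstk
              rw [hpnil, pvJoin_nil]; rfl
            | cons e r =>
              obtain ⟨j, s⟩ := e
              obtain ⟨ph, pt, rfl⟩ : ∃ ph pt, path = ph :: pt := by
                cases path with
                | nil => simp at hlenstk
                | cons ph pt => exact ⟨ph, pt, rfl⟩
              rw [pvJoins_cons] at h1
              simp only [List.map_cons, List.cons_eq_cons] at h1
              simpa using h1.1
          rw [hjh]
          by_cases hmem : PySem.Str.join "/" path ++ "/" ++
              PySem.List.pyGetD ((PySem.Str.split? line " ").getD []) 1 "" ∈ fs.keys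
          · rw [if_pos hmem] at hpre
            have hca : fs.contains (PySem.Str.join "/" path ++ "/" ++
                PySem.List.pyGetD ((PySem.Str.split? line " ").getD []) 1 "") = true :=
              (PySem.Dict.contains_iff_mem_keys fs _).2 hmem
            have hcb : t.contains (PySem.Str.join "/" path ++ "/" ++
                PySem.List.pyGetD ((PySem.Str.split? line " ").getD []) 1 "") = true :=
              (PySem.Dict.contains_iff_mem_keys t _).2 (hfk ▸ hmem)
            rw [hca, PySem.Dict.setdefault_of_contains t _ hcb]
            simp only [Bool.not_true, Bool.false_eq_true, if_false]
            exact ih fs path t stk hpre h1 h2 h3 hnd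
          · rw [if_neg hmem] at hpre
            have hca : fs.contains (PySem.Str.join "/" path ++ "/" ++
                PySem.List.pyGetD ((PySem.Str.split? line " ").getD []) 1 "") = false := by
              cases hc : fs.contains _ with
              | false => rfl
              | true => exact absurd ((PySem.Dict.contains_iff_mem_keys fs _).1 hc) hmem
            have hnpt : PySem.Str.join "/" path ++ "/" ++
                PySem.List.pyGetD ((PySem.Str.split? line " ").getD []) 1 "" ∉ t.keys := by
              rw [← hfk]; exact hmem
            have hcb : t.contains (PySem.Str.join "/" path ++ "/" ++
                PySem.List.pyGetD ((PySem.Str.split? line " ").getD []) 1 "") = false := by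
              cases hc : t.contains _ with
              | false => rfl
              | true => exact absurd ((PySem.Dict.contains_iff_mem_keys t _).1 hc) hnpt
            rw [hca, PySem.Dict.setdefault_of_not_contains t _ hcb]
            simp only [Bool.not_false, if_true]
            apply ih
            · rw [PySem.Dict.keys_insert_of_not_contains fs _ hca]
              exact hpre
            · exact h1
            · rw [pvDrainC_insert_fresh hnpt h3, ← h2]
            · refine pvC_mono ?_ h3
              intro x hx
              rw [PySem.Dict.keys_insert_of_not_contains t _ hcb]
              exact List.mem_append_left _ hx
            · exact PySem.Dict.nodup_keys_insert t _ _ hnd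
      · rw [if_neg hdir] at hpre
        rw [if_neg hdir, if_neg hdir]
        by_cases hdig : PySem.Str.strIsdigit
            (PySem.List.pyGetD ((PySem.Str.split? line " ").getD []) 0 "") = true
        · -- "<digits> name": A bumps every ancestor key, B bumps the stack top
          rw [if_pos hdig] at hpre
          rw [Bool.and_eq_true] at hpre
          obtain ⟨hall, hpre⟩ := hpre
          simp only [List.all_eq_true, decide_eq_true_eq] at hall
          rw [if_pos hdig]
          have hkeysA : (pvAddAllA ((PySem.Int.ofStr?
              (PySem.List.pyGetD ((PySem.Str.split? line " ").getD []) 0 "")).getD 0) fs path).keys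
              = fs.keys := by
            rw [pvAddAllA_eq, pvKeys_modList hall]
          cases stk with
          | nil =>
            have hpnil : path = [] := by
              cases path with
              | nil => rfl
              | cons a b => simp at hlenstk
            rw [if_neg (by simp), hpnil]
            simp only [pvAddAllA]
            subst hpnil
            exact ih fs [] t [] hpre h1 h2 h3 hnd
          | cons e r =>
            obtain ⟨j, s0⟩ := e
            rw [if_pos ⟨hdig, by simp⟩]
            have hall' : ∀ jj ∈ ((j, s0) :: r).map Prod.fst, jj ∈ t.keys := by
              intro jj hjj
              rw [← hfk]
              exact hall _ (h1 ▸ hjj)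
            have hCp : pvC t.keys 0 (pvPassUp ((PySem.Int.ofStr?
                (PySem.List.pyGetD ((PySem.Str.split? line " ").getD []) 0 "")).getD 0)
                ((j, s0) :: r)) :=
              pvC_of_all_mem (by rw [map_fst_pvPassUp]; exact hall') 0
            apply ih
            · rw [hkeysA]; exact hpre
            · rw [map_fst_pvPassUp]; exact h1
            · apply pvDictExt
              · rw [hkeysA, hfk, pvKeys_drainC hCp]
              · rw [hkeysA, hfk]; exact hnd
              · intro k
                rw [pvAddAllA_eq, pvGetD_modList, pvGetD_drainC hCp k, pvFa_passUp]
                have hfs : fs.getD k 0 = t.getD k 0 + pvFa 0 ((j, s0) :: r) k := by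
                  rw [h2]; exact pvGetD_drainC h3 k
                rw [hfs, pvFa_shift, ← h1]
                ring
            · exact pvC_of_all_mem (by rw [map_fst_pvPassUp]; exact hall') 0
            · exact hnd
        · rw [if_neg hdig] at hpre
          rw [if_neg hdig, if_neg (by tauto)]
          exact ih fs path t stk hpre h1 h2 h3 hnd

-- ===== VERDICT (by name: the statement is the Claim_ definition above) =====
theorem build_file_system_spec : Claim_equal_build_file_system := by
  unfold Claim_equal_build_file_system
  intro text _ hpre
  unfold Spec_build_file_system build_file_system build_file_system_alt
  apply pvGo text (PySem.Dict.mk [("root", 0)]) [] (PySem.Dict.mk [("root", 0)]) []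
  · have hkeys : (PySem.Dict.mk [("root", (0 : Int))]).keys = ["root"] := by
      simp [PySem.Dict.keys]
    rw [hkeys]
    exact hpre
  · rfl
  · rfl
  · trivial
  · simp [PySem.Dict.keys]
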